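-- pv_equiv track=rewrite | github.com/ttasjwi/algorithm | 문제풀이/온라인 저지/프로그래머스/# 01. Level 1/# 092334. 신고 결과 받기/python/solution.py | solution
-- ===== SOURCE A (Python) =====
-- from typing import List
--
-- def solution(id_list:List[str], reports:List[str], k:int):
--     # 각 유저가 신고 받은 횟수
--     counter = {id: 0 for id in id_list}
--
--     # 각 유저가 신고한 내역 초기화
--     graph = {id: set() for id in id_list}
--     for report in reports:
--         a, b = report.split()
--         if b not in graph[a]:
--             graph[a].add(b)
--             counter[b] += 1
--
--     # 각 유저의 신고 내역을 다시 읽어가면서, 처리 결과 메일 갯수 정산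
--     answer = []
--     for a in id_list:
--         cnt = 0
--         for b in graph[a]:
--             if counter[b] >= k:
--                 cnt += 1
--         answer.append(cnt)
--     return answer
-- ===== SOURCE B (Python) =====
-- def solution(id_list, reports, k):
--     # Sort-then-sweep: dedupe reports in order, sort by reported user,
--     # sweep contiguous runs; a run of length >= k mails every reporter in it.
--     pairs = []
--     for r in reports:
--         a, b = r.split()
--         pairs.append((a, b))
--     pairs = sorted(dict.fromkeys(pairs), key=lambda p: p[1])
--     mailed = []
--     run = []
--     cur = None
--     for a, b in pairs:
--         if b != cur:
--             if len(run) >= k: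
--                 mailed += run
--             run = []
--             cur = b
--         run.append(a)
--     if len(run) >= k:
--         mailed += run
--     return [mailed.count(i) for i in id_list]
-- ===== Notes on version B (the rewrite author's own statement) =====
-- stated objective: alternative
-- what changed: Replaces A's hash-based tallies (per-reported counter dict and per-reporter adjacency sets scanned user by user) with a sort-then-sweep: the deduplicated report pairs are sorted by reported user and swept once, and each contiguous run of length >= k appends its reporters to a mail list that is read out by count per id.
import Mathlib
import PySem

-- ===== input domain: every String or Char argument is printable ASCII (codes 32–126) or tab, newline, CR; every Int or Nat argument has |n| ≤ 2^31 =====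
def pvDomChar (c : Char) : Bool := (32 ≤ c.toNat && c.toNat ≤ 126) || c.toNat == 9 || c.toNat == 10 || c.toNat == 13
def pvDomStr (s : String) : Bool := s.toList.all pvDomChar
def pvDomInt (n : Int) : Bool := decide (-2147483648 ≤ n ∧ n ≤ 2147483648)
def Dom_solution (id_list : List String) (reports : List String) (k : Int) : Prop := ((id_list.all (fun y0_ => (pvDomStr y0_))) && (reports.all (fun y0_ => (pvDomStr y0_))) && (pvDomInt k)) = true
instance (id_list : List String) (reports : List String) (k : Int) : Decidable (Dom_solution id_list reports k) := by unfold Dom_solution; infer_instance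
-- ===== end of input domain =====

-- B replaces A's hash tallies (per-reported counter + per-reporter sets, scanned user by user) by a
-- sort-then-sweep over the deduplicated report pairs ordered by reported user; return values proved equal on Pre_.

-- ===== PORT A =====
def solution (id_list : List String) (reports : List String) (k : Int) : List Int :=
  -- counter = {id: 0 for id in id_list}
  let counter : PySem.Dict String Int :=
    id_list.foldl (fun d i => d.insert i 0) PySem.Dict.empty
  -- graph = {id: set() for id in id_list}
  let graph : PySem.Dict String (PySem.Set String) :=
    id_list.foldl (fun d i => d.insert i PySem.Set.empty) PySem.Dict.empty
  -- for report in reports: a, b = report.split(); if b not in graph[a]: graph[a].add(b); counter[b] += 1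
  let st : PySem.Dict String Int × PySem.Dict String (PySem.Set String) :=
    reports.foldl (fun st r =>
      match PySem.Str.split₀ r with
      | [a, b] =>
        let s := st.2.getD a PySem.Set.empty   -- graph[a]; Pre_ guarantees the key exists
        if PySem.Set.contains s b then st
        else (st.1.modify b 0 (· + 1), st.2.insert a (PySem.Set.add s b))
      | _ => st)   -- 'a, b = report.split()' raises outside Pre_; unchanged state as totalization
      (counter, graph)
  -- for a in id_list: cnt = 0; for b in graph[a]: if counter[b] >= k: cnt += 1; answer.append(cnt)
  id_list.map (fun a =>
    (st.2.getD a PySem.Set.empty).foldl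
      (fun cnt b => if k ≤ st.1.getD b 0 then cnt + 1 else cnt) (0 : Int))

-- ===== PORT B =====
def solution_alt (id_list : List String) (reports : List String) (k : Int) : List Int :=
  -- pairs = []; for r in reports: a, b = r.split(); pairs.append((a, b))
  let pairs0 : List (String × String) :=
    reports.foldl (fun acc r =>
      match PySem.Str.split₀ r with
      | a :: b :: [] => acc ++ [(a, b)]
      | [] => acc     -- 'a, b = r.split()' raises outside Pre_; unchanged state as totalization
      | [_] => acc
      | _ :: _ :: _ :: _ => acc)
      []
  -- pairs = sorted(dict.fromkeys(pairs), key=lambda p: p[1])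
  let pairs := PySem.List.sorted (PySem.List.dedup pairs0) (fun p => p.2)
  -- mailed = []; run = []; cur = None
  -- for a, b in pairs: if b != cur: (if len(run) >= k: mailed += run); run = []; cur = b
  --                    run.append(a)
  let st : List String × List String × Option String :=
    pairs.foldl (fun st p =>
      if some p.2 ≠ st.2.2 then
        ((if k ≤ (st.2.1.length : Int) then st.1 ++ st.2.1 else st.1), [p.1], some p.2)
      else (st.1, st.2.1 ++ [p.1], st.2.2))
      ([], [], none)
  -- if len(run) >= k: mailed += run
  let mailed := if k ≤ (st.2.1.length : Int) then st.1 ++ st.2.1 else st.1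
  -- return [mailed.count(i) for i in id_list]
  id_list.map (fun i => (mailed.count i : Int))

-- ===== PRECONDITION & SPEC =====
-- Pre_ admits exactly the inputs on which A returns: every report splits into exactly two
-- whitespace-separated tokens and both tokens are ids in id_list (otherwise A raises
-- ValueError on unpacking or KeyError on graph[a]/counter[b]).
def Pre_solution (id_list : List String) (reports : List String) (k : Int) : Prop :=
  ∀ r ∈ reports, (PySem.Str.split₀ r).length = 2 ∧ ∀ x ∈ PySem.Str.split₀ r, x ∈ id_list

instance (id_list : List String) (reports : List String) (k : Int) : Decidable (Pre_solution id_list reports k) := by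
  unfold Pre_solution; infer_instance

def pvWitness_solution : List String × List String × Int :=
  (["muzi", "frodo", "apeach", "neo"],
   ["muzi frodo", "apeach frodo", "frodo neo", "muzi neo", "apeach muzi"], 2)

def Spec_solution (id_list : List String) (reports : List String) (k : Int) (out : List Int) : Prop := out = solution_alt id_list reports k
instance (id_list : List String) (reports : List String) (k : Int) (out : List Int) : Decidable (Spec_solution id_list reports k out) := by unfold Spec_solution; infer_instance

-- ===== CLAIM (what is proved, stated in full; the proofs are below) =====
def Claim_equal_solution : Prop := ∀ (id_list : List String) (reports : List String) (k : Int), Dom_solution id_list reports k → Pre_solution id_list reports k → Spec_solution id_list reports k (solution id_list reports k)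


-- ===== LEMMAS AND PROOFS =====

-- proof-only names for the loops' step functions (definitionally the ports' lambdas)
def pvAStep (st : PySem.Dict String Int × PySem.Dict String (PySem.Set String)) (r : String) :
    PySem.Dict String Int × PySem.Dict String (PySem.Set String) :=
  match PySem.Str.split₀ r with
  | [a, b] =>
    let s := st.2.getD a PySem.Set.empty
    if PySem.Set.contains s b then st
    else (st.1.modify b 0 (· + 1), st.2.insert a (PySem.Set.add s b))
  | _ => st

-- one report's contribution to B's raw pair list
def pvPairUnit (r : String) : List (String × String) :=
  match PySem.Str.split₀ r with
  | [a, b] => [(a, b)]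
  | _ => []

-- the distinct edges, in first-insertion order (proof-side; = dedup of B's raw pair list)
def pvEdgesStep (e : PySem.Set (String × String)) (r : String) : PySem.Set (String × String) :=
  match PySem.Str.split₀ r with
  | [a, b] => PySem.Set.add e (a, b)
  | _ => e

def pvEdges (reports : List String) : PySem.Set (String × String) :=
  reports.foldl pvEdgesStep PySem.Set.empty

def pvZeroDict (id_list : List String) : PySem.Dict String Int :=
  id_list.foldl (fun d i => d.insert i 0) PySem.Dict.empty

def pvG0 (id_list : List String) : PySem.Dict String (PySem.Set String) :=
  id_list.foldl (fun d i => d.insert i PySem.Set.empty) PySem.Dict.empty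

def pvVs (reports : List String) : List String := (pvEdges reports).map (·.2)

def pvQ (reports : List String) (k : Int) : String → Bool :=
  fun b => decide (k ≤ ((pvVs reports).count b : Int))

-- B's sweep step and final flush, as proof-side names
def pvF (k : Int) (st : List String × List String × Option String) (p : String × String) :
    List String × List String × Option String :=
  if some p.2 ≠ st.2.2 then
    ((if k ≤ (st.2.1.length : Int) then st.1 ++ st.2.1 else st.1), [p.1], some p.2)
  else (st.1, st.2.1 ++ [p.1], st.2.2)

def pvFlush (k : Int) (st : List String × List String × Option String) : List String :=
  if k ≤ (st.2.1.length : Int) then st.1 ++ st.2.1 else st.1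

-- invariant tying A's (counter, graph) state to the distinct-edge list
def pvInv (id_list : List String) (c : PySem.Dict String Int)
    (g : PySem.Dict String (PySem.Set String)) (e : List (String × String)) : Prop :=
  (∀ a ∈ id_list, ∃ s : PySem.Set String, g.get? a = some s ∧ s.Nodup ∧ ∀ b, b ∈ s ↔ (a, b) ∈ e) ∧
  (∀ b ∈ id_list, c.getD b 0 = ((e.map (·.2)).count b : Int)) ∧
  e.Nodup ∧
  (∀ p ∈ e, p.2 ∈ id_list)

lemma pv_get?_foldl_insert_const {ν : Type} (l : List String) (v : ν) (d : PySem.Dict String ν) (x : String) :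
    (l.foldl (fun d i => d.insert i v) d).get? x = if x ∈ l then some v else d.get? x := by
  induction l generalizing d with
  | nil => simp
  | cons i rest ih =>
    simp only [List.foldl_cons, ih, List.mem_cons]
    by_cases hr : x ∈ rest
    · simp [hr]
    · by_cases hx : x = i <;> simp [hr, hx, PySem.Dict.get?_insert]

lemma pv_inv_init (id_list : List String) : pvInv id_list (pvZeroDict id_list) (pvG0 id_list) [] := by
  refine ⟨?_, ?_, List.nodup_nil, by simp⟩
  · intro a ha
    exact ⟨PySem.Set.empty, by simp [pvG0, pv_get?_foldl_insert_const, ha],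
      List.nodup_nil, by simp [PySem.Set.empty]⟩
  · intro b hb
    simp [pvZeroDict, PySem.Dict.getD_eq_get?_getD, pv_get?_foldl_insert_const, hb]

-- the edge-set fold is the Set.add fold of the raw pair list
lemma pv_edges_eq_foldl_add (reports : List String) (s : PySem.Set (String × String)) :
    reports.foldl pvEdgesStep s = (reports.flatMap pvPairUnit).foldl PySem.Set.add s := by
  induction reports generalizing s with
  | nil => simp
  | cons r rest ih =>
    simp only [List.foldl_cons, List.flatMap_cons, List.foldl_append]
    rw [ih]
    congr 1
    unfold pvPairUnit pvEdgesStep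
    match hs : PySem.Str.split₀ r with
    | [] | [_] | _ :: _ :: _ :: _ => simp
    | [a, b] => simp

lemma pv_loop (id_list : List String) (reports : List String)
    (hPre : ∀ r ∈ reports, (PySem.Str.split₀ r).length = 2 ∧ ∀ x ∈ PySem.Str.split₀ r, x ∈ id_list)
    (c : PySem.Dict String Int) (g : PySem.Dict String (PySem.Set String))
    (e : PySem.Set (String × String)) (h : pvInv id_list c g e) :
    pvInv id_list (reports.foldl pvAStep (c, g)).1 (reports.foldl pvAStep (c, g)).2
      (reports.foldl pvEdgesStep e) := by
  induction reports generalizing c g e with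
  | nil => simpa using h
  | cons r rest ih =>
    obtain ⟨hlen, hmem⟩ := hPre r (List.mem_cons_self)
    obtain ⟨a, b, hsplit⟩ : ∃ a b, PySem.Str.split₀ r = [a, b] := by
      match hs : PySem.Str.split₀ r with
      | [] | [_] | _ :: _ :: _ :: _ => rw [hs] at hlen; simp at hlen
      | [a, b] => exact ⟨a, b, rfl⟩
    have ha : a ∈ id_list := hmem a (by rw [hsplit]; simp)
    have hb : b ∈ id_list := hmem b (by rw [hsplit]; simp)
    obtain ⟨h1, h2, h3, h4⟩ := h
    obtain ⟨s, hgs, hsnd, hmemb⟩ := h1 a ha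
    have hgetD : g.getD a PySem.Set.empty = s := by
      rw [PySem.Dict.getD_eq_get?_getD, hgs]; rfl
    simp only [List.foldl_cons]
    by_cases hc : PySem.Set.contains s b = true
    · -- duplicate edge: both states unchanged
      have hbe : (a, b) ∈ e := (hmemb b).mp ((PySem.Set.contains_iff s b).mp hc)
      have hA : pvAStep (c, g) r = (c, g) := by
        simp only [pvAStep, hsplit]
        rw [hgetD, if_pos hc]
      have hB : pvEdgesStep e r = e := by
        simp only [pvEdgesStep, hsplit, PySem.Set.add]
        rw [if_pos ((PySem.Set.contains_iff e (a, b)).mpr hbe)]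
      rw [hA, hB]
      exact ih (fun r' hr' => hPre r' (List.mem_cons_of_mem _ hr')) c g e ⟨h1, h2, h3, h4⟩
    · -- new edge (a, b)
      have hbs : b ∉ s := fun hm => hc ((PySem.Set.contains_iff s b).mpr hm)
      have hbe : (a, b) ∉ e := fun hm => hbs ((hmemb b).mpr hm)
      have hadd : PySem.Set.add s b = s ++ [b] := by
        simp only [PySem.Set.add]
        rw [if_neg hc]
      have hA : pvAStep (c, g) r = (c.modify b 0 (· + 1), g.insert a (s ++ [b])) := by
        simp only [pvAStep, hsplit]
        rw [hgetD, if_neg hc, hadd]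
      have hB : pvEdgesStep e r = e ++ [(a, b)] := by
        simp only [pvEdgesStep, hsplit, PySem.Set.add]
        rw [if_neg (fun hcn => hbe ((PySem.Set.contains_iff e (a, b)).mp hcn))]
      rw [hA, hB]
      apply ih (fun r' hr' => hPre r' (List.mem_cons_of_mem _ hr'))
      refine ⟨?_, ?_, ?_, ?_⟩
      · intro a' ha'
        by_cases haa : a' = a
        · subst haa
          refine ⟨s ++ [b], by rw [PySem.Dict.get?_insert, if_pos rfl], ?_, ?_⟩
          · rw [List.nodup_append]
            exact ⟨hsnd, List.nodup_singleton _,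
              by intro x hx y hy hxy; exact hbs (((List.mem_singleton.mp hy) ▸ hxy : x = b) ▸ hx)⟩
          · intro b'
            constructor
            · intro hm
              rcases List.mem_append.mp hm with hm | hm
              · exact List.mem_append_left _ ((hmemb b').mp hm)
              · simp at hm; subst hm; exact List.mem_append_right _ (by simp)
            · intro hm
              rcases List.mem_append.mp hm with hm | hm
              · exact List.mem_append_left _ ((hmemb b').mpr hm)
              · have hb2 : b' = b := by
                  have := List.mem_singleton.mp hm
                  exact congrArg Prod.snd this
                rw [hb2]; exact List.mem_append_right _ (by simp)
        · obtain ⟨s', hg', hn', hm'⟩ := h1 a' ha'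
          refine ⟨s', by rw [PySem.Dict.get?_insert, if_neg haa]; exact hg', hn', ?_⟩
          intro b'
          rw [hm' b']
          constructor
          · exact fun hm => List.mem_append_left _ hm
          · intro hm
            rcases List.mem_append.mp hm with hm | hm
            · exact hm
            · exact absurd (congrArg Prod.fst (List.mem_singleton.mp hm)) haa
      · intro b' hb'
        rw [PySem.Dict.getD_modify]
        by_cases hbb : b' = b
        · subst hbb
          rw [if_pos rfl, h2 b' hb']
          simp [List.count_append]
        · rw [if_neg hbb, h2 b' hb']
          have : List.count b' (List.map (fun x => x.2) (e ++ [(a, b)]))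
              = List.count b' (List.map (fun x => x.2) e) := by
            have hne : b ≠ b' := fun hh => hbb hh.symm
            simp [List.count_append, hne]
          rw [this]
      · rw [List.nodup_append]
        exact ⟨h3, List.nodup_singleton _,
          by intro p hp q hq hpq; exact hbe (((List.mem_singleton.mp hq) ▸ hpq : p = (a, b)) ▸ hp)⟩
      · intro p hp
        rcases List.mem_append.mp hp with hp | hp
        · exact h4 p hp
        · simp at hp; subst hp; exact hb

lemma pvA_eq (id_list : List String) (reports : List String) (k : Int) :
    solution id_list reports k =
      id_list.map (fun a =>
        ((reports.foldl pvAStep (pvZeroDict id_list, pvG0 id_list)).2.getD a PySem.Set.empty).foldl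
          (fun cnt b => if k ≤ (reports.foldl pvAStep (pvZeroDict id_list, pvG0 id_list)).1.getD b 0
            then cnt + 1 else cnt) (0 : Int)) := rfl

lemma pvB_eq (id_list : List String) (reports : List String) (k : Int) :
    solution_alt id_list reports k =
      id_list.map (fun i =>
        ((pvFlush k ((PySem.List.sorted (PySem.List.dedup (reports.foldl (fun acc r =>
            match PySem.Str.split₀ r with
            | a :: b :: [] => acc ++ [(a, b)]
            | [] => acc
            | [_] => acc
            | _ :: _ :: _ :: _ => acc) []) ) (fun p => p.2)).foldl (pvF k) ([], [], none))).count i : Int)) := rfl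

-- a run of pairs that all keep the current target just accumulates reporters
lemma pv_chunk (k : Int) (l1 : List (String × String)) (b : String)
    (h : ∀ q ∈ l1, q.2 = b) (mailed run : List String) :
    l1.foldl (pvF k) (mailed, run, some b) = (mailed, run ++ l1.map (·.1), some b) := by
  induction l1 generalizing run with
  | nil => simp
  | cons q rest ih =>
    have hq : q.2 = b := h q (List.mem_cons_self)
    simp only [List.foldl_cons, pvF, hq]
    rw [if_neg (by simp)]
    rw [ih (fun q' hq' => h q' (List.mem_cons_of_mem _ hq')) (run ++ [q.1])]
    simp

-- the sweep over a key-grouped list flushes the pending run and then emits,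
-- in order, the reporters of every target whose multiplicity reaches k
lemma pv_run (k : Int) (n : Nat) : ∀ (l : List (String × String)), l.length ≤ n →
    ∀ (mailed run : List String) (cur : Option String),
    (l.map (·.2)).Pairwise (· ≤ ·) → (∀ p ∈ l, some p.2 ≠ cur) →
    pvFlush k (l.foldl (pvF k) (mailed, run, cur)) =
      pvFlush k (mailed, run, cur) ++
        (l.filter (fun p => decide (k ≤ ((l.map (·.2)).count p.2 : Int)))).map (·.1) := by
  induction n with
  | zero =>
    intro l hl
    have : l = [] := List.eq_nil_of_length_eq_zero (Nat.le_zero.mp hl)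
    subst this
    intro mailed run cur _ _
    simp
  | succ n ih =>
    intro l hl mailed run cur hpw hcur
    match l with
    | [] => simp
    | p :: rest =>
      obtain ⟨l1, l2, hrest, hl1b', hhead, hlen2⟩ :
          ∃ l1 l2, rest = l1 ++ l2 ∧ (∀ q ∈ l1, (q.2 == p.2) = true) ∧
            (∀ q0 ∈ l2.head?, (q0.2 == p.2) = false) ∧
            l2.length ≤ rest.length := by
        refine ⟨rest.takeWhile (fun q => q.2 == p.2), rest.dropWhile (fun q => q.2 == p.2),
          (List.takeWhile_append_dropWhile).symm, ?_, ?_, List.length_dropWhile_le _ _⟩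
        · intro q hq
          have h := List.mem_takeWhile_imp hq
          exact h
        · intro q0 hq0
          rw [Option.mem_def] at hq0
          have h := List.head?_dropWhile_not (fun q => q.2 == p.2) rest
          rw [hq0] at h
          simpa using h
      have hl1b : ∀ q ∈ l1, q.2 = p.2 := by
        intro q hq
        simpa using hl1b' q hq
      -- every element of l2 has target ≠ p.2 (first fails the predicate; later ones are ≥ it)
      have hl2b : ∀ q ∈ l2, q.2 ≠ p.2 := by
        intro q hq
        obtain ⟨q0, l2', hq2⟩ : ∃ q0 l2', l2 = q0 :: l2' := by
          cases hcl : l2 with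
          | nil => rw [hcl] at hq; simp at hq
          | cons x t => exact ⟨x, t, rfl⟩

        have hq0 : ¬ (q0.2 == p.2) = true := by
          have := hhead q0 (by rw [hq2]; rfl)
          simp [this]
        have hq0' : q0.2 ≠ p.2 := by simpa using hq0
        -- p.2 ≤ q0.2 from the global pairwise, hence p.2 < q0.2
        have hple : p.2 ≤ q0.2 := by
          have hq0mem : q0 ∈ rest := by
            rw [hrest, hq2]; exact List.mem_append_right _ (List.mem_cons_self)
          have hpw' := hpw
          rw [List.map_cons] at hpw'
          exact (List.pairwise_cons.mp hpw').1 q0.2 (List.mem_map_of_mem hq0mem)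
        have hplt : p.2 < q0.2 := lt_of_le_of_ne hple (fun hh => hq0' hh.symm)
        -- q0.2 ≤ r.2 for r later in l2
        have hpw2 : (l2.map (·.2)).Pairwise (· ≤ ·) := by
          have hsub : l2.Sublist (p :: rest) :=
            List.Sublist.trans (by rw [hrest]; exact List.sublist_append_right _ _)
              (List.sublist_cons_self _ _)
          exact List.Pairwise.sublist (List.Sublist.map _ hsub) hpw
        rw [hq2] at hq
        rcases List.mem_cons.mp hq with hq | hq
        · subst hq; exact hq0'
        · have : q0.2 ≤ q.2 := by
            rw [hq2, List.map_cons] at hpw2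
            exact (List.pairwise_cons.mp hpw2).1 q.2 (List.mem_map_of_mem hq)
          exact fun hh => absurd (hh ▸ this) (not_le.mpr hplt)
      -- first step: flush (cur changes), then the chunk l1 accumulates
      have hstep : pvF k (mailed, run, cur) p
          = (pvFlush k (mailed, run, cur), [p.1], some p.2) := by
        simp only [pvF, pvFlush]
        rw [if_pos (hcur p (List.mem_cons_self))]
      have hfold : (p :: rest).foldl (pvF k) (mailed, run, cur)
          = l2.foldl (pvF k) (pvFlush k (mailed, run, cur), p.1 :: l1.map (·.1), some p.2) := by
        rw [List.foldl_cons, hstep, hrest, List.foldl_append,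
          pv_chunk k l1 p.2 hl1b _ [p.1]]
        simp
      rw [hfold]
      have hl2len : l2.length ≤ n := by
        have h2 : rest.length ≤ n := by simpa using hl
        omega
      have hpw2 : (l2.map (·.2)).Pairwise (· ≤ ·) := by
        have hsub : l2.Sublist (p :: rest) :=
          List.Sublist.trans (by rw [hrest]; exact List.sublist_append_right _ _)
            (List.sublist_cons_self _ _)
        exact List.Pairwise.sublist (List.Sublist.map _ hsub) hpw
      have hcur2 : ∀ q ∈ l2, some q.2 ≠ some p.2 := by
        intro q hq
        simpa using hl2b q hq
      rw [ih l2 hl2len _ _ _ hpw2 hcur2]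
      -- counts: the target p.2 occurs 1 + l1.length times in l; l2 targets keep their own counts
      have hcnt_p : ((p :: rest).map (·.2)).count p.2 = 1 + l1.length := by
        rw [hrest]
        simp only [List.map_cons, List.map_append, List.count_cons, List.count_append]
        have hc1 : (l1.map (·.2)).count p.2 = l1.length := by
          rw [List.count_eq_length.mpr (by intro b hb; obtain ⟨q, hq, hqb⟩ := List.mem_map.mp hb; exact (hqb ▸ (hl1b q hq)).symm)]
          simp
        have hc2 : (l2.map (·.2)).count p.2 = 0 := by
          rw [List.count_eq_zero]
          intro hm
          obtain ⟨q, hq, hqb⟩ := List.mem_map.mp hm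
          exact hl2b q hq hqb
        rw [hc1, hc2]
        simp [Nat.add_comm]
      have hcnt_l2 : ∀ q ∈ l2, ((p :: rest).map (·.2)).count q.2 = (l2.map (·.2)).count q.2 := by
        intro q hq
        rw [hrest]
        simp only [List.map_cons, List.map_append, List.count_cons, List.count_append]
        have hc1 : (l1.map (·.2)).count q.2 = 0 := by
          rw [List.count_eq_zero]
          intro hm
          obtain ⟨q', hq', hqb⟩ := List.mem_map.mp hm
          exact hl2b q hq (hqb ▸ hl1b q' hq')
        have hne : (p.2 == q.2) = false := by
          simp only [beq_eq_false_iff_ne]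
          exact fun hh => hl2b q hq hh.symm
        rw [hc1, hne]
        simp
      -- split the filter over p :: l1 ++ l2
      have hfilter : ((p :: rest).filter
            (fun q => decide (k ≤ (((p :: rest).map (·.2)).count q.2 : Int)))).map (·.1)
          = (if k ≤ ((1 + l1.length : Nat) : Int) then p.1 :: l1.map (·.1) else []) ++
            (l2.filter (fun q => decide (k ≤ ((l2.map (·.2)).count q.2 : Int)))).map (·.1) := by
        rw [hrest]
        rw [show p :: (l1 ++ l2) = (p :: l1) ++ l2 by simp]
        rw [List.filter_append, List.map_append]
        congr 1
        · -- the p :: l1 block: the condition is constant (= k ≤ 1 + |l1|)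
          have hcond : ∀ q ∈ p :: l1,
              (decide (k ≤ ((((p :: l1) ++ l2).map (·.2)).count q.2 : Int))) =
              (decide (k ≤ ((1 + l1.length : Nat) : Int))) := by
            intro q hq
            have hqb : q.2 = p.2 := by
              rcases List.mem_cons.mp hq with hq | hq
              · rw [hq]
              · exact hl1b q hq
            have : (((p :: l1) ++ l2).map (·.2)).count q.2 = 1 + l1.length := by
              rw [hqb]
              have := hcnt_p
              rw [hrest] at this
              simpa using this
            rw [this]
          rw [List.filter_congr hcond]
          by_cases hk : k ≤ ((1 + l1.length : Nat) : Int)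
          · rw [if_pos hk, List.filter_eq_self.mpr
              (fun q hq => by simp only [decide_eq_true_eq]; exact_mod_cast hk)]
            simp
          · rw [if_neg hk, List.filter_eq_nil_iff.mpr
              (fun q hq => by
                simp only [decide_eq_true_eq]
                intro hc
                exact hk (by exact_mod_cast hc))]
            simp
        · -- the l2 block: counts in l equal counts in l2
          apply congrArg
          apply List.filter_congr
          intro q hq
          have : (((p :: l1) ++ l2).map (·.2)).count q.2 = (l2.map (·.2)).count q.2 := by
            have := hcnt_l2 q hq
            rw [hrest] at this
            simpa using this
          rw [this]
      rw [hfilter]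
      -- both sides flush the same block
      simp only [pvFlush]
      have hlen : ((p.1 :: l1.map (·.1)).length : Int) = ((1 + l1.length : Nat) : Int) := by
        simp [Nat.add_comm]
      by_cases hk : k ≤ ((1 + l1.length : Nat) : Int)
      · rw [if_pos (by rw [hlen]; exact hk), if_pos hk]
        simp
      · rw [if_neg (by rw [hlen]; exact hk), if_neg hk]
        simp

-- ===== VERDICT (by name: the statement is the Claim_ definition above) =====
theorem solution_spec : Claim_equal_solution := by
  intro id_list reports k _hDom hPre
  unfold Spec_solution
  rw [pvA_eq, pvB_eq]
  apply List.map_congr_left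
  intro a ha
  have hInv := pv_loop id_list reports hPre _ _ PySem.Set.empty (pv_inv_init id_list)
  rw [show reports.foldl pvEdgesStep PySem.Set.empty = pvEdges reports from rfl] at hInv
  obtain ⟨h1, h2, h3, h4⟩ := hInv
  obtain ⟨s, hgs, hsnd, hmemb⟩ := h1 a ha
  -- A side: count over graph[a]
  have hgetD : (reports.foldl pvAStep (pvZeroDict id_list, pvG0 id_list)).2.getD a PySem.Set.empty = s := by
    rw [PySem.Dict.getD_eq_get?_getD, hgs]; rfl
  rw [hgetD]
  have hfn : (fun (cnt : Int) b => if k ≤ (reports.foldl pvAStep (pvZeroDict id_list, pvG0 id_list)).1.getD b 0 then cnt + 1 else cnt)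
      = (fun cnt b => if (fun b => decide (k ≤ (reports.foldl pvAStep (pvZeroDict id_list, pvG0 id_list)).1.getD b 0)) b = true then cnt + 1 else cnt) := by
    funext cnt b; simp
  rw [hfn, PySem.List.foldl_count_if]
  have hcong : s.countP (fun b => decide (k ≤ (reports.foldl pvAStep (pvZeroDict id_list, pvG0 id_list)).1.getD b 0))
      = s.countP (pvQ reports k) := by
    apply List.countP_congr
    intro b hbmem
    have hbid : b ∈ id_list := h4 (a, b) ((hmemb b).mp hbmem)
    simp [pvQ, h2 b hbid, pvVs]
  rw [hcong]
  -- B side: name the sorted pair list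
  have hdedup : PySem.List.dedup (reports.foldl (fun acc r =>
      match PySem.Str.split₀ r with
      | a :: b :: [] => acc ++ [(a, b)]
      | [] => acc
      | [_] => acc
      | _ :: _ :: _ :: _ => acc) []) = pvEdges reports := by
    rw [PySem.List.dedup_eq_ofList]
    have hraw : reports.foldl (fun acc r =>
        match PySem.Str.split₀ r with
        | a :: b :: [] => acc ++ [(a, b)]
        | [] => acc
        | [_] => acc
        | _ :: _ :: _ :: _ => acc) [] = reports.flatMap pvPairUnit := by
      have := PySem.List.foldl_append_eq_flatMap pvPairUnit reports ([] : List (String × String))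
      rw [List.nil_append] at this
      rw [← this]
      apply PySem.List.foldl_congr_mem
      intro acc r _
      unfold pvPairUnit
      match hs : PySem.Str.split₀ r with
      | [] | [_] | _ :: _ :: _ :: _ => simp
      | [a, b] => simp
    rw [hraw, PySem.Set.ofList_eq_foldl]
    exact (pv_edges_eq_foldl_add reports PySem.Set.empty).symm
  rw [hdedup]
  set pairs := PySem.List.sorted (pvEdges reports) (fun p => p.2) with hpairs
  have hperm : pairs.Perm (pvEdges reports) := PySem.List.sorted_perm _ _ _
  have hpw : (pairs.map (·.2)).Pairwise (· ≤ ·) := PySem.List.sorted_map_key_pairwise _ _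
  have hcur0 : ∀ p ∈ pairs, some p.2 ≠ (none : Option String) := by intro p _; simp
  have hrun := pv_run k pairs.length pairs (le_refl _) [] [] none hpw hcur0
  rw [hrun]
  have hflush0 : pvFlush k (([] : List String), ([] : List String), (none : Option String)) = [] := by
    simp only [pvFlush]
    split <;> simp
  rw [hflush0, List.nil_append]
  -- the sweep's condition is pvQ (counts are permutation-invariant)
  have hcond : (fun (p : String × String) => decide (k ≤ ((pairs.map (·.2)).count p.2 : Int)))
      = (fun p => pvQ reports k p.2) := by
    funext p
    have : (pairs.map (·.2)).count p.2 = (pvVs reports).count p.2 :=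
      (hperm.map (·.2)).count_eq p.2
    simp [pvQ, this]
  rw [hcond]
  -- count of a in the mailed list = countP over the distinct edges
  have hcount : ((pairs.filter (fun p => pvQ reports k p.2)).map (·.1)).count a
      = pairs.countP (fun p => (p.1 == a) && pvQ reports k p.2) := by
    rw [List.count_eq_countP, List.countP_map, List.countP_filter]
    apply List.countP_congr
    intro p _
    simp only [Function.comp]
  have hcountE : pairs.countP (fun p => (p.1 == a) && pvQ reports k p.2)
      = (pvEdges reports).countP (fun p => (p.1 == a) && pvQ reports k p.2) :=
    hperm.countP_eq _
  rw [hcount, hcountE]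
  -- tie A's per-user set to the edges with reporter a
  have hcount2 : (pvEdges reports).countP (fun p => (p.1 == a) && pvQ reports k p.2)
      = ((pvEdges reports).filter (fun p => (p.1 == a) && pvQ reports k p.2)).length := by
    rw [List.countP_eq_length_filter]
  have hperm2 : ((pvEdges reports).filter (fun p => (p.1 == a) && pvQ reports k p.2)).Perm
      ((s.filter (pvQ reports k)).map (fun b => (a, b))) := by
    apply (List.perm_ext_iff_of_nodup (List.Nodup.filter _ h3)
      (List.Nodup.map (fun b1 b2 hh => congrArg Prod.snd hh) (List.Nodup.filter _ hsnd))).mpr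
    intro p
    constructor
    · intro hp
      obtain ⟨hpE, hcondp⟩ := List.mem_filter.mp hp
      obtain ⟨hpa, hpq⟩ := Bool.and_eq_true_iff.mp hcondp
      have hpa' : p.1 = a := by simpa using hpa
      have hps : p.2 ∈ s := (hmemb p.2).mpr (by rw [← hpa']; exact hpE)
      refine List.mem_map.mpr ⟨p.2, List.mem_filter.mpr ⟨hps, hpq⟩, ?_⟩
      rw [← hpa']
    · intro hp
      obtain ⟨b, hbm, hbp⟩ := List.mem_map.mp hp
      obtain ⟨hbs, hbq⟩ := List.mem_filter.mp hbm
      subst hbp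
      refine List.mem_filter.mpr ⟨(hmemb b).mp hbs, ?_⟩
      simp [hbq]
  rw [hcount2, hperm2.length_eq, List.length_map, ← List.countP_eq_length_filter]
  simp
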